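-- pv_equiv track=rewrite | github.com/mislavzanic/advent-of-code | src/y2015/8.py | part2
-- ===== SOURCE A (Python) =====
-- def part1(lines):
--     C, M = 0, 0
--     for line in lines:
--         code, memory = 2, 0
--         line = line[1:-1]
--         num = len(line)
--         code, memory = code + num, memory + num
--         i = 0
--         while i < len(line):
--             c = line[i]
--             if c == '\\':
--                 if line[i + 1] == 'x':
--                     memory -= 3
--                     i += 3
--                 elif line[i + 1] == '\\' or line[i + 1] == '\"':
--                     memory -= 1
--                     i += 1
--             i += 1
--         C, M = C + code, M + memory
--     return C - M
--
-- def part2(lines):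
--     new_lines = []
--     for line in lines:
--         new_line = '\"'
--         for i, c in enumerate(line):
--             if c == '\\':
--                 new_line += '\\\\'
--             elif c == '\"':
--                 new_line += '\\\"'
--         new_line += '\"'
--         new_lines.append(new_line)
--     return part1(new_lines)
-- ===== SOURCE B (Python) =====
-- def part2(lines):
--     return sum(2 + line.count('\\') + line.count('"') for line in lines)
-- ===== Notes on version B (the rewrite author's own statement) =====
-- stated objective: simpler
-- what changed: B computes the answer directly as a one-line sum of 2 + backslash-count + quote-count per line, instead of building each escaped string and re-parsing it with part1's index-walking while loop.
import Mathlib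
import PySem

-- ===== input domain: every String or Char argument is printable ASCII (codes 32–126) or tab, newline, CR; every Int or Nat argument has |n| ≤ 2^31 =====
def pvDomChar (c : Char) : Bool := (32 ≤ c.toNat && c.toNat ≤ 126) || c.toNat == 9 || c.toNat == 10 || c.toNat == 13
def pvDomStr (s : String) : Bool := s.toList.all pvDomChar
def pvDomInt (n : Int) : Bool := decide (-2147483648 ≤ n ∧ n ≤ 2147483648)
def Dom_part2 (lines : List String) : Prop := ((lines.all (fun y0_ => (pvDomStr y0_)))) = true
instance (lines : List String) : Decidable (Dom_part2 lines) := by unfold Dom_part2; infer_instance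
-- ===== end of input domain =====

-- B replaces A's build-escaped-string-then-reparse (via part1) with a direct per-line
-- count: 2 + #backslashes + #quotes per line. Return values proved equal on all inputs.

-- ===== PORT A =====
-- part1's inner while loop: i walks the (sliced) line; line[i+1] is read with getD ' '
-- (Python would raise IndexError there, but on the strings part2 feeds to part1 a
-- backslash is always followed by another character, so the default is unreachable).
def memLoop (cs : List Char) (i : Nat) (memory : Int) : Int :=
  if h : i < cs.length then
    let c := cs[i]
    if c = '\\' then
      if cs.getD (i+1) ' ' = 'x' then memLoop cs (i+4) (memory - 3)
      else if cs.getD (i+1) ' ' = '\\' ∨ cs.getD (i+1) ' ' = '"' then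
        memLoop cs (i+2) (memory - 1)
      else memLoop cs (i+1) memory
    else memLoop cs (i+1) memory
  else memory
termination_by cs.length - i
decreasing_by all_goals omega

-- part1, as called by part2: lines already as char lists
def part1Port (lines : List (List Char)) : Int :=
  let cm := lines.foldl (fun (cm : Int × Int) line =>
    let line' := PySem.List.slice line (some 1) (some (-1))
    let num : Int := line'.length
    let code : Int := 2 + num
    let memory : Int := 0 + num
    (cm.1 + code, cm.2 + memLoop line' 0 memory)) (0, 0)
  cm.1 - cm.2

def part2 (lines : List String) : Int :=
  let new_lines := lines.foldl (fun nls line =>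
    let body := (PySem.List.enumerate line.toList).foldl (fun (acc : List Char) ic =>
      if ic.2 = '\\' then acc ++ ['\\', '\\']
      else if ic.2 = '"' then acc ++ ['\\', '"']
      else acc) ['"']
    nls ++ [body ++ ['"']]) []
  part1Port new_lines

-- ===== PORT B =====
def part2_alt (lines : List String) : Int :=
  (lines.map (fun line =>
    2 + (PySem.Str.count line "\\" : Int) + (PySem.Str.count line "\"" : Int))).sum

-- ===== PRECONDITION & SPEC =====
def Spec_part2 (lines : List String) (out : Int) : Prop := out = part2_alt lines
instance (lines : List String) (out : Int) : Decidable (Spec_part2 lines out) := by unfold Spec_part2; infer_instance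

-- ===== CLAIM (what is proved, stated in full; the proofs are below) =====
def Claim_equal_part2 : Prop := ∀ (lines : List String), Dom_part2 lines → Spec_part2 lines (part2 lines)

-- ===== LEMMAS AND PROOFS =====

-- structural form of the escaped body of one line
def encB : List Char → List Char
  | [] => []
  | c :: cs =>
      (if c = '\\' then ['\\', '\\'] else if c = '"' then ['\\', '"'] else []) ++ encB cs

lemma enc_foldl (cs : List Char) (s : Int) (acc : List Char) :
    (PySem.List.enumerate cs s).foldl (fun (a : List Char) ic =>
      if ic.2 = '\\' then a ++ ['\\', '\\']
      else if ic.2 = '"' then a ++ ['\\', '"']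
      else a) acc = acc ++ encB cs := by
  induction cs generalizing s acc with
  | nil => simp [PySem.List.enumerate_nil, encB]
  | cons c t ih =>
    rw [PySem.List.enumerate_cons]
    simp only [List.foldl_cons]
    by_cases h1 : c = '\\'
    · rw [if_pos h1, ih, encB, if_pos h1, List.append_assoc]
    · by_cases h2 : c = '"'
      · rw [if_neg h1, if_pos h2, ih, encB, if_neg h1, if_pos h2, List.append_assoc]
      · rw [if_neg h1, if_neg h2, ih, encB, if_neg h1, if_neg h2, List.nil_append]

lemma memLoop_cons (x : Char) (l : List Char) (i : Nat) (m : Int) :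
    memLoop (x :: l) (i + 1) m = memLoop l i m := by
  fun_induction memLoop l i m with
  | case1 cs i m h hx hgx ih =>
    rw [memLoop]
    simp only [List.length_cons, List.getElem_cons_succ, List.getD_cons_succ]
    rw [dif_pos (by omega), if_pos hx, if_pos hgx]
    exact ih
  | case2 cs i m h hx hgx hbq ih =>
    rw [memLoop]
    simp only [List.length_cons, List.getElem_cons_succ, List.getD_cons_succ]
    rw [dif_pos (by omega), if_pos hx, if_neg hgx, if_pos hbq]
    exact ih
  | case3 cs i m h hx hgx hbq ih =>
    rw [memLoop]
    simp only [List.length_cons, List.getElem_cons_succ, List.getD_cons_succ]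
    rw [dif_pos (by omega), if_pos hx, if_neg hgx, if_neg hbq]
    exact ih
  | case4 cs i m h hx ih =>
    rw [memLoop]
    simp only [List.length_cons, List.getElem_cons_succ, List.getD_cons_succ]
    rw [dif_pos (by omega), if_neg hx]
    exact ih
  | case5 cs i m =>
    rw [memLoop]
    rw [dif_neg (by simp; omega)]

lemma memLoop_encB (cs : List Char) (m : Int) :
    memLoop (encB cs) 0 m = m - (cs.count '\\' : Int) - (cs.count '"' : Int) := by
  induction cs generalizing m with
  | nil =>
    rw [encB, memLoop]
    simp
  | cons c t ih =>
    by_cases h1 : c = '\\'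
    · rw [encB, if_pos h1]
      rw [memLoop]
      simp only [List.cons_append, List.nil_append, List.length_cons, List.getElem_cons_zero,
        List.getD_cons_succ, List.getD_cons_zero]
      rw [if_pos trivial, if_neg (by decide), if_pos (Or.inl trivial)]
      rw [show (0 + 2 : Nat) = 1 + 1 by rfl, memLoop_cons, memLoop_cons, ih]
      subst h1
      simp
      ring
    · by_cases h2 : c = '"'
      · rw [encB, if_neg h1, if_pos h2]
        rw [memLoop]
        simp only [List.cons_append, List.nil_append, List.length_cons, List.getElem_cons_zero,
          List.getD_cons_succ, List.getD_cons_zero]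
        rw [if_pos trivial, if_neg (by decide), if_pos (Or.inr trivial)]
        rw [show (0 + 2 : Nat) = 1 + 1 by rfl, memLoop_cons, memLoop_cons, ih]
        subst h2
        simp [h1]
        ring
      · rw [encB, if_neg h1, if_neg h2, List.nil_append, ih]
        simp [h1, h2]

lemma encB_length (cs : List Char) :
    (encB cs).length = 2 * (cs.count '\\' + cs.count '"') := by
  induction cs with
  | nil => simp [encB]
  | cons c t ih =>
    rw [encB]
    by_cases h1 : c = '\\'
    · subst h1; simp [ih]; ring
    · by_cases h2 : c = '"'
      · subst h2; simp [ih, h1]; ring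
      · simp [ih, List.count_cons, if_neg h1, if_neg h2]

lemma count_go_singleton (c : Char) (cs : List Char) (fuel acc : Nat) (h : cs.length ≤ fuel) :
    PySem.Chars.count.go [c] fuel cs acc = acc + cs.count c := by
  induction cs generalizing fuel acc with
  | nil => cases fuel <;> simp [PySem.Chars.count.go]
  | cons x t ih =>
    cases fuel with
    | zero => simp at h
    | succ n =>
      simp only [PySem.Chars.count.go, List.isPrefixOf, Bool.and_true, List.count_cons,
        List.length_cons, List.length_nil, List.drop_succ_cons, List.drop_zero]
      by_cases hc : c = x
      · subst hc
        simp only [BEq.rfl, reduceIte]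
        rw [ih _ _ (by simpa using h)]
        omega
      · have hb : (c == x) = false := by simp [hc]
        simp only [hb, Bool.false_eq_true, reduceIte]
        rw [ih _ _ (by simpa using h)]
        simp [Ne.symm hc]

lemma count_singleton (cs : List Char) (c : Char) :
    PySem.Chars.count cs [c] = cs.count c := by
  simp only [PySem.Chars.count, List.isEmpty_cons, Bool.false_eq_true, reduceIte]
  simpa using count_go_singleton c cs cs.length 0 le_rfl

lemma slice_quotes (E : List Char) :
    PySem.List.slice ('"' :: E ++ ['"']) (some 1) (some (-1)) = E := by
  simp [PySem.List.slice, PySem.List.clampIdx]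
  rw [if_neg (by omega)]
  simp

-- the paired-accumulator fold of part1Port, peeled into a sum
lemma foldpair (f1 f2 : List Char → Int) (ls : List (List Char)) (a b : Int) :
    (ls.foldl (fun (cm : Int × Int) l => (cm.1 + f1 l, cm.2 + f2 l)) (a, b)).1
      - (ls.foldl (fun (cm : Int × Int) l => (cm.1 + f1 l, cm.2 + f2 l)) (a, b)).2
      = a - b + (ls.map (fun l => f1 l - f2 l)).sum := by
  induction ls generalizing a b with
  | nil => simp
  | cons l t ih =>
    simp only [List.foldl_cons, List.map_cons, List.sum_cons]
    rw [ih]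
    ring

-- per-line value of A: what part1 contributes for one encoded line
lemma perline (l : List Char) :
    (2 + ((PySem.List.slice ('"' :: (encB l ++ ['"'])) (some 1) (some (-1))).length : Int))
      - memLoop (PySem.List.slice ('"' :: (encB l ++ ['"'])) (some 1) (some (-1))) 0
          (0 + ((PySem.List.slice ('"' :: (encB l ++ ['"'])) (some 1) (some (-1))).length : Int))
      = 2 + (l.count '\\' : Int) + (l.count '"' : Int) := by
  rw [show ('"' :: (encB l ++ ['"'])) = ('"' :: encB l ++ ['"']) from rfl, slice_quotes, memLoop_encB, encB_length]
  push_cast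
  ring

-- ===== VERDICT (by name: the statement is the Claim_ definition above) =====
theorem part2_spec : Claim_equal_part2 := by
  intro lines _
  unfold Spec_part2 part2 part2_alt part1Port
  rw [PySem.List.foldl_append_singleton_eq_map]
  simp only [enc_foldl]
  rw [show (['"'] : List Char) = '"' :: [] by rfl]
  simp only [List.nil_append]
  rw [foldpair (fun l => 2 + ((PySem.List.slice l (some 1) (some (-1))).length : Int))
        (fun l => memLoop (PySem.List.slice l (some 1) (some (-1))) 0
          (0 + ((PySem.List.slice l (some 1) (some (-1))).length : Int)))]
  simp only [List.map_map, Function.comp_def, List.cons_append, List.nil_append]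
  rw [show (0:Int) - 0 = 0 from rfl, zero_add]
  congr 1
  apply List.map_congr_left
  intro l _
  rw [perline l.toList]
  simp only [PySem.Str.count_eq]
  rw [show ("\\" : String).toList = ['\\'] from rfl, show ("\"" : String).toList = ['"'] from rfl]
  rw [count_singleton, count_singleton]
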